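-- pv_equiv track=rewrite | github.com/Sushilb34/enterprise_rag | app/web_crawling/markdown_converter.py | _remove_sections_by_header
-- ===== SOURCE A (Python) =====
-- from typing import List
--
-- def _remove_sections_by_header(md: str, headers: List[str]) -> str:
--     """Remove sections starting with specified headers."""
--     lines = md.split("\n")
--     cleaned = []
--     skip = False
--
--     for line in lines:
--         if any(line.startswith(h) for h in headers):
--             skip = True
--         if line.startswith("## ") or line.startswith("### "):
--             skip = False  # stop skipping at next header
--         if not skip:
--             cleaned.append(line)
--
--     return "\n".join(cleaned)
-- ===== SOURCE B (Python) =====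
-- from typing import List
--
-- def _remove_sections_by_header(md: str, headers: List[str]) -> str:
--     """Remove sections starting with specified headers (two-phase scanner)."""
--     lines = md.split("\n")
--     n = len(lines)
--     res = []
--     i = 0
--     while i < n:
--         # keep phase: copy lines; section headers are always kept
--         while i < n:
--             line = lines[i]
--             if line.startswith("## ") or line.startswith("### "):
--                 res.append(line)
--                 i += 1
--             elif any(line.startswith(h) for h in headers):
--                 i += 1
--                 break
--             else:
--                 res.append(line)
--                 i += 1
--         # drop phase: discard until the next section header
--         while i < n and not (lines[i].startswith("## ") or lines[i].startswith("### ")):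
--             i += 1
--     return "\n".join(res)
-- ===== Notes on version B (the rewrite author's own statement) =====
-- stated objective: alternative
-- what changed: Replaced the per-line boolean skip-flag state machine (three independent if-tests on every line) by an explicit two-phase scanner: a keep phase that copies lines until a removal header fires, and a drop phase that discards lines until the next '## '/'### ' section header.
import Mathlib
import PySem

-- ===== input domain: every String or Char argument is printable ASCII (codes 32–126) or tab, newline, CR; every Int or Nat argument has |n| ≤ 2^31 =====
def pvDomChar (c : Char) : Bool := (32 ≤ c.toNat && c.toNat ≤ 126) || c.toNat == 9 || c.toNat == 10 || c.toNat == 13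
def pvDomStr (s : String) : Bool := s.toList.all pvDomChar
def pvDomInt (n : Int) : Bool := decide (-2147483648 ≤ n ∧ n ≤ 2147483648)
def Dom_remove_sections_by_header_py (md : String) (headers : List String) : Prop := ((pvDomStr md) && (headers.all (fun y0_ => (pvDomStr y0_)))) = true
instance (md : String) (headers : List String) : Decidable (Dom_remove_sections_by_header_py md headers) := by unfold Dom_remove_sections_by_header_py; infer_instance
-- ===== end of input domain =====

-- B replaces A's per-line boolean skip-flag state machine by a two-phase (keep/drop) scanner; alternative decomposition, same cost.

-- ===== PORT A =====
-- A: one pass over the lines, a bool `skip` updated by three ifs per line, kept lines accumulated.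
def remove_sections_by_header_py (md : String) (headers : List String) : String :=
  let lines := (PySem.Str.split? md "\n").getD []
  let st := lines.foldl (fun (st : List String × Bool) line =>
    let skip := if headers.any (fun h => PySem.Str.startswith line h) then true else st.2
    let skip := if PySem.Str.startswith line "## " || PySem.Str.startswith line "### " then false else skip
    (if !skip then st.1 ++ [line] else st.1, skip)) ([], false)
  PySem.Str.join "\n" st.1

-- ===== PORT B =====
-- B: keep phase copies lines (section headers always kept) until a removal header fires;
-- drop phase discards lines until the next section header. The two inner while-loops of Source B
-- over the line index become this mutual structural recursion over the remaining lines.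
def pvIsSec (line : String) : Bool :=
  PySem.Str.startswith line "## " || PySem.Str.startswith line "### "

def pvMatchH (headers : List String) (line : String) : Bool :=
  headers.any (fun h => PySem.Str.startswith line h)

mutual
def pvKeep (headers : List String) : List String → List String
  | [] => []
  | l :: rest =>
      if pvIsSec l then l :: pvKeep headers rest
      else if pvMatchH headers l then pvDrop headers rest
      else l :: pvKeep headers rest
def pvDrop (headers : List String) : List String → List String
  | [] => []
  | l :: rest =>
      if pvIsSec l then l :: pvKeep headers rest
      else pvDrop headers rest
end

def remove_sections_by_header_py_alt (md : String) (headers : List String) : String :=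
  PySem.Str.join "\n" (pvKeep headers ((PySem.Str.split? md "\n").getD []))

-- ===== PRECONDITION & SPEC =====
def Spec_remove_sections_by_header_py (md : String) (headers : List String) (out : String) : Prop := out = remove_sections_by_header_py_alt md headers
instance (md : String) (headers : List String) (out : String) : Decidable (Spec_remove_sections_by_header_py md headers out) := by unfold Spec_remove_sections_by_header_py; infer_instance

-- ===== CLAIM (what is proved, stated in full; the proofs are below) =====
def Claim_equal_remove_sections_by_header_py : Prop := ∀ (md : String) (headers : List String), Dom_remove_sections_by_header_py md headers → Spec_remove_sections_by_header_py md headers (remove_sections_by_header_py md headers)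

-- ===== LEMMAS AND PROOFS =====

-- A's fold, started in state (acc, skip), appends exactly B's keep- (skip = false) or
-- drop-phase (skip = true) output to acc.
theorem pvFold_eq (headers : List String) (ls : List String) :
    ∀ (acc : List String) (skip : Bool),
    (ls.foldl (fun (st : List String × Bool) line =>
      let s := if headers.any (fun h => PySem.Str.startswith line h) then true else st.2
      let s := if PySem.Str.startswith line "## " || PySem.Str.startswith line "### " then false else s
      (if !s then st.1 ++ [line] else st.1, s)) (acc, skip)).1
      = acc ++ (if skip then pvDrop headers ls else pvKeep headers ls) := by
  induction ls with
  | nil => intro acc skip; cases skip <;> simp [pvKeep, pvDrop]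
  | cons l rest ih =>
    intro acc skip
    by_cases hsec : (PySem.Str.startswith l "## " || PySem.Str.startswith l "### ") = true
    · by_cases hm : (headers.any fun h => PySem.Str.startswith l h) = true <;>
        cases skip <;>
          simp only [List.foldl_cons, hsec, hm, Bool.not_false,
            pvKeep, pvDrop, pvIsSec, pvMatchH, reduceIte, ih, Bool.false_eq_true,
            List.append_assoc, List.singleton_append]
    · have hsec' : (PySem.Str.startswith l "## " || PySem.Str.startswith l "### ") = false :=
        Bool.not_eq_true _ ▸ Bool.of_not_eq_true hsec
      by_cases hm : (headers.any fun h => PySem.Str.startswith l h) = true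
      · cases skip <;>
          simp only [List.foldl_cons, hsec', hm, Bool.not_true,
            pvKeep, pvDrop, pvIsSec, pvMatchH, reduceIte, ih, Bool.false_eq_true]
      · have hm' : (headers.any fun h => PySem.Str.startswith l h) = false :=
          Bool.of_not_eq_true hm
        cases skip <;>
          simp only [List.foldl_cons, hsec', hm', Bool.not_true, Bool.not_false,
            pvKeep, pvDrop, pvIsSec, pvMatchH, reduceIte, ih, Bool.false_eq_true,
            List.append_assoc, List.singleton_append]

-- ===== VERDICT (by name: the statement is the Claim_ definition above) =====
theorem remove_sections_by_header_py_spec : Claim_equal_remove_sections_by_header_py := by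
  intro md headers _
  show PySem.Str.join "\n"
      (((PySem.Str.split? md "\n").getD []).foldl (fun (st : List String × Bool) line =>
        let skip := if headers.any (fun h => PySem.Str.startswith line h) then true else st.2
        let skip := if PySem.Str.startswith line "## " || PySem.Str.startswith line "### " then false else skip
        (if !skip then st.1 ++ [line] else st.1, skip)) ([], false)).1
    = remove_sections_by_header_py_alt md headers
  rw [pvFold_eq]
  simp [remove_sections_by_header_py_alt]
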